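-- pv_equiv track=rewrite | github.com/princevalerie/aksarajawa9 | app4.py | detect_spaces
-- ===== SOURCE A (Python) =====
-- def detect_spaces(bounding_boxes, threshold=20):
--     words = []
--     current_word = []
--     for i, bbox in enumerate(bounding_boxes):
--         if i == 0:
--             current_word.append(bbox)
--             continue
--         previous_bbox = bounding_boxes[i - 1]
--         x_prev, y_prev, w_prev, h_prev = previous_bbox
--         x, y, w, h = bbox
--         # Calculate horizontal gap between the current and previous bounding box
--         horizontal_gap = x - (x_prev + w_prev)
--         if horizontal_gap > threshold:
--             words.append(current_word)
--             current_word = []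
--         current_word.append(bbox)
--     if current_word:
--         words.append(current_word)
--     return words
-- ===== SOURCE B (Python) =====
-- def detect_spaces(bounding_boxes, threshold=20):
--     if not bounding_boxes:
--         return []
--     # Pass 1: indices where a new word starts (gap to the previous box exceeds threshold).
--     breaks = []
--     for i, (prev, bbox) in enumerate(zip(bounding_boxes, bounding_boxes[1:])):
--         x_prev, y_prev, w_prev, h_prev = prev
--         x, y, w, h = bbox
--         if x - (x_prev + w_prev) > threshold:
--             breaks.append(i + 1)
--     # Pass 2: cut the list at the break positions.
--     starts = [0] + breaks
--     ends = breaks + [len(bounding_boxes)]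
--     return [bounding_boxes[s:e] for s, e in zip(starts, ends)]
-- ===== Notes on version B (the rewrite author's own statement) =====
-- stated objective: alternative
-- what changed: A builds words in one stateful loop with a running current_word accumulator; B first computes the list of break indices in one pass over zip(bbs, bbs[1:]) and then cuts the original list into slices between consecutive breaks.
import Mathlib
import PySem

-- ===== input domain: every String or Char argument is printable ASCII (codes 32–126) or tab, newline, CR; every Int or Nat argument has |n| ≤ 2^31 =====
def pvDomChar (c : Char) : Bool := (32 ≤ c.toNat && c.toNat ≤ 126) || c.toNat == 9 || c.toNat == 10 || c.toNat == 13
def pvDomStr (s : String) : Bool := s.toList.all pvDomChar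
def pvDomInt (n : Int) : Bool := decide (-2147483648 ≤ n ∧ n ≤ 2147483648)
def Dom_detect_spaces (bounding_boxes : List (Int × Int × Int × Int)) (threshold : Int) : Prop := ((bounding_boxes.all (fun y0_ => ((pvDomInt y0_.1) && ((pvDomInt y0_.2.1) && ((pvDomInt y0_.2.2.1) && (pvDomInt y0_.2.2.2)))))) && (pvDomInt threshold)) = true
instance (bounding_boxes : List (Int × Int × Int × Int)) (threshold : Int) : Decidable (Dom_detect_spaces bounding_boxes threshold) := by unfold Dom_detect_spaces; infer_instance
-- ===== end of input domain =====

-- B replaces A's single accumulator loop by two passes (collect break indices, then cut the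
-- list into slices between them); objective: alternative decomposition, same O(n) cost.

-- ===== PORT A =====
-- Port of A: one fold over enumerate(bounding_boxes) carrying (words, current_word);
-- bounding_boxes[i-1] is read back from the list by index, exactly as the Python does.
-- pyGetD with a default is exact here: every index i-1 the loop reads is in range (1 ≤ i ≤ len-1).
def detect_spaces (bounding_boxes : List (Int × Int × Int × Int)) (threshold : Int) : List (List (Int × Int × Int × Int)) :=
  let r := (PySem.List.enumerate bounding_boxes 0).foldl
    (fun (st : List (List (Int × Int × Int × Int)) × List (Int × Int × Int × Int)) ib =>
      let words := st.1
      let current_word := st.2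
      let i := ib.1
      let bbox := ib.2
      if i = 0 then (words, current_word ++ [bbox])
      else
        let previous_bbox := PySem.List.pyGetD bounding_boxes (i - 1) (0, 0, 0, 0)
        let horizontal_gap := bbox.1 - (previous_bbox.1 + previous_bbox.2.2.1)
        if horizontal_gap > threshold then (words ++ [current_word], [bbox])
        else (words, current_word ++ [bbox]))
    ([], [])
  if r.2 ≠ [] then r.1 ++ [r.2] else r.1

-- ===== PORT B =====
-- Port of B: pass 1 collects break indices from enumerate(zip(bbs, bbs[1:])); pass 2 maps slices
-- over zip([0]+breaks, breaks+[len]).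
def detect_spaces_alt (bounding_boxes : List (Int × Int × Int × Int)) (threshold : Int) : List (List (Int × Int × Int × Int)) :=
  if bounding_boxes = [] then []
  else
    let breaks := (PySem.List.enumerate (List.zip bounding_boxes (PySem.List.slice bounding_boxes (some 1) none)) 0).foldl
      (fun acc ip =>
        if ip.2.2.1 - (ip.2.1.1 + ip.2.1.2.2.1) > threshold then acc ++ [ip.1 + 1] else acc) []
    let starts := (0 : Int) :: breaks
    let ends := breaks ++ [(bounding_boxes.length : Int)]
    (List.zip starts ends).map (fun se => PySem.List.slice bounding_boxes (some se.1) (some se.2))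

-- ===== PRECONDITION & SPEC =====
def Spec_detect_spaces (bounding_boxes : List (Int × Int × Int × Int)) (threshold : Int) (out : List (List (Int × Int × Int × Int))) : Prop := out = detect_spaces_alt bounding_boxes threshold
instance (bounding_boxes : List (Int × Int × Int × Int)) (threshold : Int) (out : List (List (Int × Int × Int × Int))) : Decidable (Spec_detect_spaces bounding_boxes threshold out) := by unfold Spec_detect_spaces; infer_instance

-- ===== CLAIM (what is proved, stated in full; the proofs are below) =====
def Claim_equal_detect_spaces : Prop := ∀ (bounding_boxes : List (Int × Int × Int × Int)) (threshold : Int), Dom_detect_spaces bounding_boxes threshold → Spec_detect_spaces bounding_boxes threshold (detect_spaces bounding_boxes threshold)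

-- ===== LEMMAS AND PROOFS =====

-- the break test between a previous box p and a box b
def gapBreak (t : Int) (p b : Int × Int × Int × Int) : Bool := b.1 - (p.1 + p.2.2.1) > t

-- canonical grouping that both ports are reduced to
def chopGo (t : Int) (prev : Int × Int × Int × Int) (cur : List (Int × Int × Int × Int)) :
    List (Int × Int × Int × Int) → List (List (Int × Int × Int × Int))
  | [] => [cur]
  | b :: rest =>
    if gapBreak t prev b then cur :: chopGo t b [b] rest
    else chopGo t b (cur ++ [b]) rest

def chop (t : Int) : List (Int × Int × Int × Int) → List (List (Int × Int × Int × Int))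
  | [] => []
  | b :: rest => chopGo t b [b] rest

-- extending a take-slice by the next element of the list
theorem take_snoc {α : Type} (l : List α) (s j : Nat) (b : α) (hb : l[j]? = some b) (hs : s ≤ j) :
    (l.drop s).take (j - s) ++ [b] = (l.drop s).take (j + 1 - s) := by
  have h1 : j + 1 - s = (j - s) + 1 := by omega
  rw [h1, List.take_add_one, List.getElem?_drop]
  have h2 : s + (j - s) = j := by omega
  rw [h2, hb]
  simp

-- invariant of A's loop over the remaining suffix: prev is the element just before suf in bbs
theorem foldA (t : Int) (bbs : List (Int × Int × Int × Int)) :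
    ∀ (suf pre : List (Int × Int × Int × Int)) (prev : Int × Int × Int × Int)
      (ws : List (List (Int × Int × Int × Int))) (cur : List (Int × Int × Int × Int)),
      bbs = pre ++ prev :: suf → cur ≠ [] →
      (let r := (PySem.List.enumerate suf ((pre.length : Int) + 1)).foldl
        (fun (st : List (List (Int × Int × Int × Int)) × List (Int × Int × Int × Int)) ib =>
          let words := st.1
          let current_word := st.2
          let i := ib.1
          let bbox := ib.2
          if i = 0 then (words, current_word ++ [bbox])
          else
            let previous_bbox := PySem.List.pyGetD bbs (i - 1) (0, 0, 0, 0)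
            let horizontal_gap := bbox.1 - (previous_bbox.1 + previous_bbox.2.2.1)
            if horizontal_gap > t then (words ++ [current_word], [bbox])
            else (words, current_word ++ [bbox]))
        (ws, cur)
       if r.2 ≠ [] then r.1 ++ [r.2] else r.1) = ws ++ chopGo t prev cur suf := by
  intro suf
  induction suf with
  | nil =>
    intro pre prev ws cur hbbs hcur
    simp [PySem.List.enumerate, chopGo, hcur]
  | cons b rest ih =>
    intro pre prev ws cur hbbs hcur
    rw [PySem.List.enumerate_cons]
    simp only [List.foldl_cons]
    have hi : ¬ ((pre.length : Int) + 1 = 0) := by omega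
    have harith : (pre.length : Int) + 1 - 1 = (pre.length : Int) := by ring
    have hprev : PySem.List.pyGetD bbs ((pre.length : Int)) (0, 0, 0, 0) = prev := by
      rw [hbbs, PySem.List.pyGetD_natCast]
      simp [List.getD_eq_getElem?_getD]
    simp only [hi, if_false, harith, hprev]
    by_cases hg : b.1 - (prev.1 + prev.2.2.1) > t
    · simp only [hg, if_true]
      have := ih (pre ++ [prev]) b (ws ++ [cur]) [b]
        (by rw [hbbs]; simp) (by simp)
      simp only [List.length_append, List.length_cons, List.length_nil] at this
      push_cast at this ⊢
      rw [show ((pre.length : Int) + 1 + 1) = (pre.length : Int) + (0+1) + 1 by ring] at this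
      rw [show ((pre.length : Int) + 1 + 1) = (pre.length : Int) + (0+1) + 1 by ring]
      rw [this]
      simp [chopGo, gapBreak, hg]
    · simp only [hg, if_false]
      have := ih (pre ++ [prev]) b ws (cur ++ [b])
        (by rw [hbbs]; simp) (by simp)
      simp only [List.length_append, List.length_cons, List.length_nil] at this
      push_cast at this ⊢
      rw [show ((pre.length : Int) + 1 + 1) = (pre.length : Int) + (0+1) + 1 by ring] at this
      rw [show ((pre.length : Int) + 1 + 1) = (pre.length : Int) + (0+1) + 1 by ring]
      rw [this]
      simp [chopGo, gapBreak, hg]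

theorem A_eq_chop (t : Int) (bbs : List (Int × Int × Int × Int)) :
    detect_spaces bbs t = chop t bbs := by
  cases bbs with
  | nil => simp [detect_spaces, chop, PySem.List.enumerate]
  | cons b rest =>
    unfold detect_spaces
    rw [PySem.List.enumerate_cons]
    simp only [List.foldl_cons, List.nil_append]
    have := foldA t (b :: rest) rest [] b [] [b] (by simp) (by simp)
    simp only [List.length_nil, Nat.cast_zero, zero_add] at this
    simpa [chop] using this

-- invariant of B's slicing pass: the group being built is the slice of bbs from s to the cursor
theorem sliceGo (t : Int) (bbs : List (Int × Int × Int × Int)) :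
    ∀ (suf pre : List (Int × Int × Int × Int)) (prev : Int × Int × Int × Int) (s : Nat),
      s ≤ pre.length → bbs = pre ++ prev :: suf →
      (let brs := ((PySem.List.enumerate (List.zip (prev :: suf) suf) (pre.length : Int)).filter
          (fun ip => gapBreak t ip.2.1 ip.2.2)).map (fun ip => ip.1 + 1)
       (List.zip ((s : Int) :: brs) (brs ++ [(bbs.length : Int)])).map
          (fun se => PySem.List.slice bbs (some se.1) (some se.2)))
        = chopGo t prev ((bbs.drop s).take (pre.length + 1 - s)) suf := by
  intro suf
  induction suf with
  | nil =>
    intro pre prev s hs hbbs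
    have hlen : bbs.length = pre.length + 1 := by rw [hbbs]; simp
    simp [chopGo, PySem.List.slice_natCast]
    omega
  | cons b rest ih =>
    intro pre prev s hs hbbs
    rw [List.zip_cons_cons, PySem.List.enumerate_cons]
    have hdrop : (bbs.drop (pre.length + 1)) = b :: rest := by
      rw [hbbs, show pre ++ prev :: b :: rest = (pre ++ [prev]) ++ b :: rest by simp,
        show pre.length + 1 = (pre ++ [prev]).length by simp, List.drop_left]
    by_cases hg : gapBreak t prev b = true
    · simp only [List.filter_cons, hg, if_true, List.map_cons]
      have := ih (pre ++ [prev]) b (pre.length + 1) (by simp) (by rw [hbbs]; simp)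
      simp only [List.length_append, List.length_cons, List.length_nil] at this
      push_cast at this ⊢
      rw [List.cons_append, List.zip_cons_cons, List.map_cons, this]
      rw [show ((pre.length : Int) + 1) = (((pre.length + 1 : Nat)) : Int) by push_cast; ring,
        PySem.List.slice_natCast]
      simp only [chopGo, hg, if_true, hdrop]
      norm_num
    · simp only [List.filter_cons, hg, if_false, Bool.false_eq_true]
      have := ih (pre ++ [prev]) b s (by simp; omega) (by rw [hbbs]; simp)
      simp only [List.length_append, List.length_cons, List.length_nil] at this
      push_cast at this ⊢
      rw [this]
      have hb2 : bbs[pre.length + 1]? = some b := by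
        rw [hbbs, show pre ++ prev :: b :: rest = (pre ++ [prev]) ++ b :: rest by simp,
          show pre.length + 1 = (pre ++ [prev]).length by simp,
          List.getElem?_append_right (by simp)]
        simp
      simp only [chopGo, hg, if_false, Bool.false_eq_true]
      rw [← take_snoc bbs s (pre.length + 1) b hb2 (by omega)]

theorem B_eq_chop (t : Int) (bbs : List (Int × Int × Int × Int)) :
    detect_spaces_alt bbs t = chop t bbs := by
  cases bbs with
  | nil => simp [detect_spaces_alt, chop]
  | cons b rest =>
    unfold detect_spaces_alt
    rw [if_neg (by simp)]
    rw [PySem.List.slice_from_one]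
    have hfold : ∀ (l : List (Int × (Int × Int × Int × Int) × (Int × Int × Int × Int))) (acc : List Int),
        l.foldl (fun acc ip =>
          if ip.2.2.1 - (ip.2.1.1 + ip.2.1.2.2.1) > t then acc ++ [ip.1 + 1] else acc) acc
        = acc ++ (l.filter (fun ip => gapBreak t ip.2.1 ip.2.2)).map (fun ip => ip.1 + 1) := by
      intro l acc
      rw [← PySem.List.foldl_append_if (fun ip => gapBreak t ip.2.1 ip.2.2) (fun ip => ip.1 + 1) l acc]
      simp [gapBreak]
    rw [hfold]
    have := sliceGo t (b :: rest) rest [] b 0 (by simp) (by simp)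
    simp only [List.length_nil, Nat.cast_zero, List.tail_cons] at this ⊢
    simpa [chop] using this

-- ===== VERDICT (by name: the statement is the Claim_ definition above) =====
theorem detect_spaces_spec : Claim_equal_detect_spaces := by
  intro bbs t _
  unfold Spec_detect_spaces
  rw [A_eq_chop, B_eq_chop]
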